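-- pv_equiv track=rewrite | github.com/chberclaz/MyPT | scripts/data_prep/prepare_context_extension.py | greedy_pack
-- ===== SOURCE A (Python) =====
-- def greedy_pack(episodes, block_size, pad_token_id):
--     """
--     Pack episodes into fixed-size blocks. No episode splitting.
--     Produces segment_ids for segment-isolated attention (prevents
--     cross-episode attention bleeding within packed blocks).
--
--     Returns list of (tokens, mask, segment_ids) tuples.
--     segment_ids: 0=padding, 1=first episode, 2=second episode, etc.
--     """
--     blocks = []
--     current_tokens = []
--     current_mask = []
--     current_segments = []
--     current_seg_id = 1
--
--     for ep_tokens in episodes: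
--         ep_len = len(ep_tokens)
--
--         if ep_len > block_size:
--             ep_tokens = ep_tokens[:block_size]
--             ep_len = block_size
--
--         remaining = block_size - len(current_tokens)
--
--         if ep_len <= remaining:
--             current_tokens.extend(ep_tokens)
--             current_mask.extend([1] * ep_len)
--             current_segments.extend([current_seg_id] * ep_len)
--             current_seg_id += 1
--             if current_seg_id > 255:
--                 current_seg_id = 1
--         else:
--             pad_len = block_size - len(current_tokens)
--             current_tokens.extend([pad_token_id] * pad_len)
--             current_mask.extend([0] * pad_len)
--             current_segments.extend([0] * pad_len)
--
--             assert len(current_tokens) == block_size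
--             blocks.append((current_tokens, current_mask, current_segments))
--
--             current_tokens = list(ep_tokens)
--             current_mask = [1] * ep_len
--             current_segments = [1] * ep_len
--             current_seg_id = 2
--
--     if current_tokens:
--         pad_len = block_size - len(current_tokens)
--         current_tokens.extend([pad_token_id] * pad_len)
--         current_mask.extend([0] * pad_len)
--         current_segments.extend([0] * pad_len)
--         blocks.append((current_tokens, current_mask, current_segments))
--
--     return blocks
-- ===== SOURCE B (Python) =====
-- def _render(group, block_size, pad_token_id):
--     tokens, mask, segs = [], [], []
--     seg = 1
--     for ep in group:
--         tokens += ep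
--         mask += [1] * len(ep)
--         segs += [seg] * len(ep)
--         seg = 1 if seg == 255 else seg + 1
--     pad = block_size - len(tokens)
--     return (tokens + [pad_token_id] * pad,
--             mask + [0] * pad,
--             segs + [0] * pad)
--
--
-- def greedy_pack(episodes, block_size, pad_token_id):
--     # pass 1: group the (truncated) episodes into blocks by the greedy rule
--     done, cur, used = [], [], 0
--     for ep in episodes:
--         if len(ep) > block_size:
--             ep = ep[:block_size]
--         if len(ep) > block_size - used:
--             done.append(cur)
--             cur, used = [ep], len(ep)
--         else:
--             cur.append(ep)
--             used += len(ep)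
--     groups = done + [cur] if used > 0 else done
--     # pass 2: render each group into a padded block
--     return [_render(g, block_size, pad_token_id) for g in groups]
-- ===== Notes on version B (the rewrite author's own statement) =====
-- stated objective: alternative
-- what changed: A interleaves packing, segment-id bookkeeping and padding in one stateful loop with an inline flush; B decomposes the task into a first pass that only groups (truncated) episodes into blocks by the greedy rule and a second pass that renders each group into its padded (tokens, mask, segment_ids) triple.
-- outside the precondition, e.g. on greedy_pack([[1, 2]], -1, 0): A returns [([1], [], [])], B returns [([], [], []), ([1], [1], [1])]
import Mathlib
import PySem

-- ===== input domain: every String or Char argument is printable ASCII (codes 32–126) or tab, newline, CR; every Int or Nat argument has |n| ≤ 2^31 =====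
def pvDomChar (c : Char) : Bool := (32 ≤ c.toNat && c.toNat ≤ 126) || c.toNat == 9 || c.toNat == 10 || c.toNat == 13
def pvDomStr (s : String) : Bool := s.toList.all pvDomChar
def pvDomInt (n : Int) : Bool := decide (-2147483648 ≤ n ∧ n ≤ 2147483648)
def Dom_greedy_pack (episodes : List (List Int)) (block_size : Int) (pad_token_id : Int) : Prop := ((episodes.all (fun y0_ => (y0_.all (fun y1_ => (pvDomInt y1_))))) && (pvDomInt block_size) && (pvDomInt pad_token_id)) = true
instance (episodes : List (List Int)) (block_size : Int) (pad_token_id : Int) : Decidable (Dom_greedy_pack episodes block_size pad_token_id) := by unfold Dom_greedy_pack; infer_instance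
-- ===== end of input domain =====

-- B replaces A's single stateful pack-and-flush loop by a two-pass decomposition (group episodes into blocks, then render each block); same cost, return values equal for block_size ≥ 0.


-- ===== PORT A =====
-- A's loop state: (blocks, current_tokens, current_mask, current_segments, current_seg_id)
-- A's `assert` always holds under Pre_ (0 ≤ block_size) and is not modelled.
def pvStepA (block_size pad_token_id : Int)
    (st : List (List Int × List Int × List Int) × List Int × List Int × List Int × Int)
    (ep0 : List Int) :
    List (List Int × List Int × List Int) × List Int × List Int × List Int × Int :=
  let ep_tokens := if (ep0.length : Int) > block_size then PySem.List.slice ep0 none (some block_size) else ep0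
  let ep_len : Int := if (ep0.length : Int) > block_size then block_size else (ep0.length : Int)
  let remaining := block_size - (st.2.1.length : Int)
  if ep_len ≤ remaining then
    (st.1, st.2.1 ++ ep_tokens, st.2.2.1 ++ List.replicate ep_len.toNat 1,
     st.2.2.2.1 ++ List.replicate ep_len.toNat st.2.2.2.2,
     if st.2.2.2.2 + 1 > 255 then 1 else st.2.2.2.2 + 1)
  else
    let pad_len := block_size - (st.2.1.length : Int)
    (st.1 ++ [(st.2.1 ++ List.replicate pad_len.toNat pad_token_id,
               st.2.2.1 ++ List.replicate pad_len.toNat 0,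
               st.2.2.2.1 ++ List.replicate pad_len.toNat 0)],
     ep_tokens, List.replicate ep_len.toNat 1, List.replicate ep_len.toNat 1, 2)

def greedy_pack (episodes : List (List Int)) (block_size : Int) (pad_token_id : Int) :
    List (List Int × List Int × List Int) :=
  let st := episodes.foldl (pvStepA block_size pad_token_id) ([], [], [], [], 1)
  if st.2.1 = [] then st.1
  else
    let pad_len := block_size - (st.2.1.length : Int)
    st.1 ++ [(st.2.1 ++ List.replicate pad_len.toNat pad_token_id,
              st.2.2.1 ++ List.replicate pad_len.toNat 0,
              st.2.2.2.1 ++ List.replicate pad_len.toNat 0)]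

-- ===== PORT B =====
-- inner step of B's `_render`: accumulate (tokens, mask, segs, seg)
def pvStepI (acc : List Int × List Int × List Int × Int) (ep : List Int) :
    List Int × List Int × List Int × Int :=
  (acc.1 ++ ep, acc.2.1 ++ List.replicate ep.length 1,
   acc.2.2.1 ++ List.replicate ep.length acc.2.2.2,
   if acc.2.2.2 == 255 then (1 : Int) else acc.2.2.2 + 1)

-- port of B's `_render`
def pvRender (block_size pad_token_id : Int) (group : List (List Int)) :
    List Int × List Int × List Int :=
  let r := group.foldl pvStepI ([], [], [], (1 : Int))
  let pad := (block_size - (r.1.length : Int)).toNat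
  (r.1 ++ List.replicate pad pad_token_id, r.2.1 ++ List.replicate pad 0, r.2.2.1 ++ List.replicate pad 0)

-- B's pass-1 state: (done groups, current group, used token count)
def pvStepB (block_size : Int)
    (st : List (List (List Int)) × List (List Int) × Int) (ep0 : List Int) :
    List (List (List Int)) × List (List Int) × Int :=
  let ep := if (ep0.length : Int) > block_size then PySem.List.slice ep0 none (some block_size) else ep0
  if (ep.length : Int) > block_size - st.2.2 then (st.1 ++ [st.2.1], [ep], (ep.length : Int))
  else (st.1, st.2.1 ++ [ep], st.2.2 + (ep.length : Int))

def greedy_pack_alt (episodes : List (List Int)) (block_size : Int) (pad_token_id : Int) :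
    List (List Int × List Int × List Int) :=
  let st := episodes.foldl (pvStepB block_size) ([], [], 0)
  let groups := if st.2.2 > 0 then st.1 ++ [st.2.1] else st.1
  groups.map (pvRender block_size pad_token_id)

-- ===== PRECONDITION & SPEC =====
-- Pre_ excludes negative block_size, which is outside the function's natural domain: there A's
-- `assert` raises AssertionError on some inputs, and where it returns, the values are accidents
-- of Python's negative slicing and negative list-repeat counts.
def Pre_greedy_pack (episodes : List (List Int)) (block_size : Int) (pad_token_id : Int) : Prop :=
  0 ≤ block_size
instance (episodes : List (List Int)) (block_size : Int) (pad_token_id : Int) : Decidable (Pre_greedy_pack episodes block_size pad_token_id) := by unfold Pre_greedy_pack; infer_instance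

def pvWitness_greedy_pack : List (List Int) × Int × Int := ([[1, 2], [3]], 2, 0)

def Spec_greedy_pack (episodes : List (List Int)) (block_size : Int) (pad_token_id : Int) (out : List (List Int × List Int × List Int)) : Prop := out = greedy_pack_alt episodes block_size pad_token_id
instance (episodes : List (List Int)) (block_size : Int) (pad_token_id : Int) (out : List (List Int × List Int × List Int)) : Decidable (Spec_greedy_pack episodes block_size pad_token_id out) := by unfold Spec_greedy_pack; infer_instance

-- ===== CLAIM (what is proved, stated in full; the proofs are below) =====
def Claim_equal_greedy_pack : Prop := ∀ (episodes : List (List Int)) (block_size : Int) (pad_token_id : Int), Dom_greedy_pack episodes block_size pad_token_id → Pre_greedy_pack episodes block_size pad_token_id → Spec_greedy_pack episodes block_size pad_token_id (greedy_pack episodes block_size pad_token_id)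

-- ===== LEMMAS AND PROOFS =====

-- the unpadded render of a group (the inner fold of pvRender)
def pvPartial (g : List (List Int)) : List Int × List Int × List Int × Int :=
  g.foldl pvStepI ([], [], [], (1 : Int))

-- A's finalization (flush of a non-empty buffer)
def pvFinA (block_size pad_token_id : Int)
    (st : List (List Int × List Int × List Int) × List Int × List Int × List Int × Int) :
    List (List Int × List Int × List Int) :=
  if st.2.1 = [] then st.1
  else
    st.1 ++ [(st.2.1 ++ List.replicate (block_size - (st.2.1.length : Int)).toNat pad_token_id,
              st.2.2.1 ++ List.replicate (block_size - (st.2.1.length : Int)).toNat 0,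
              st.2.2.2.1 ++ List.replicate (block_size - (st.2.1.length : Int)).toNat 0)]

-- B's finalization (keep the last group iff it holds tokens, then render)
def pvFinB (block_size pad_token_id : Int)
    (st : List (List (List Int)) × List (List Int) × Int) :
    List (List Int × List Int × List Int) :=
  (if st.2.2 > 0 then st.1 ++ [st.2.1] else st.1).map (pvRender block_size pad_token_id)

theorem pvSeg_le (g : List (List Int)) : (pvPartial g).2.2.2 ≤ 255 := by
  suffices h : ∀ (g : List (List Int)) (acc : List Int × List Int × List Int × Int),
      acc.2.2.2 ≤ 255 → (g.foldl pvStepI acc).2.2.2 ≤ 255 by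
    exact h g _ (by norm_num)
  intro g
  induction g with
  | nil => intro acc h; exact h
  | cons e t ih =>
    intro acc h
    refine ih _ ?_
    simp only [pvStepI]
    by_cases h255 : acc.2.2.2 = 255 <;> simp [h255] <;> omega

theorem pvPartial_snoc (g : List (List Int)) (ep : List Int) :
    pvPartial (g ++ [ep]) = pvStepI (pvPartial g) ep := by
  simp [pvPartial]

-- the two seg-id updates agree while the counter is ≤ 255
theorem pvSegIf (s : Int) (h : s ≤ 255) :
    (if s + 1 > 255 then (1 : Int) else s + 1) = (if s == 255 then (1 : Int) else s + 1) := by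
  by_cases h255 : s = 255 <;> simp [h255] <;> omega

-- the truncated episode's length is A's ep_len
theorem pvEpLen (block_size : Int) (hbs : 0 ≤ block_size) (ep0 : List Int) :
    (((if (ep0.length : Int) > block_size then PySem.List.slice ep0 none (some block_size) else ep0).length : Int))
      = if (ep0.length : Int) > block_size then block_size else (ep0.length : Int) := by
  split_ifs with h
  · rw [PySem.List.slice_to ep0 hbs]
    simp only [List.length_take]
    omega
  · rfl

-- main loop correspondence: A's state is the rendered image of B's state
theorem pvLoop (block_size pad_token_id : Int) (hbs : 0 ≤ block_size) :
    ∀ (eps : List (List Int)) (done : List (List (List Int))) (cur : List (List Int)),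
      pvFinA block_size pad_token_id
        (eps.foldl (pvStepA block_size pad_token_id)
          (done.map (pvRender block_size pad_token_id),
           (pvPartial cur).1, (pvPartial cur).2.1, (pvPartial cur).2.2.1, (pvPartial cur).2.2.2))
      = pvFinB block_size pad_token_id
          (eps.foldl (pvStepB block_size) (done, cur, ((pvPartial cur).1.length : Int))) := by
  intro eps
  induction eps with
  | nil =>
    intro done cur
    simp only [List.foldl_nil, pvFinA, pvFinB]
    by_cases hc : (pvPartial cur).1 = []
    · have hlen : ¬ ((0 : Int) < ((pvPartial cur).1.length : Int)) := by simp [hc]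
      simp [hc, hlen]
    · have hlen : (0 : Int) < ((pvPartial cur).1.length : Int) := by
        exact_mod_cast List.length_pos_iff.mpr hc
      simp only [if_neg hc, if_pos hlen, List.map_append, List.map_cons, List.map_nil]
      simp [pvRender, pvPartial]
  | cons ep0 rest ih =>
    intro done cur
    simp only [List.foldl_cons]
    have hseg := pvSeg_le cur
    have he := pvEpLen block_size hbs ep0
    set ep : List Int := if (ep0.length : Int) > block_size then PySem.List.slice ep0 none (some block_size) else ep0 with hep
    by_cases hfit : ((ep.length : Int)) ≤ block_size - ((pvPartial cur).1.length : Int)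
    · have h2 : pvStepB block_size (done, cur, ((pvPartial cur).1.length : Int)) ep0
          = (done, cur ++ [ep], ((pvPartial (cur ++ [ep])).1.length : Int)) := by
        simp only [pvStepB, ← hep, pvPartial_snoc, pvStepI]
        rw [if_neg (by omega)]
        simp
      have h1 : pvStepA block_size pad_token_id
            (done.map (pvRender block_size pad_token_id),
             (pvPartial cur).1, (pvPartial cur).2.1, (pvPartial cur).2.2.1, (pvPartial cur).2.2.2) ep0
          = (done.map (pvRender block_size pad_token_id),
             (pvPartial (cur ++ [ep])).1, (pvPartial (cur ++ [ep])).2.1,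
             (pvPartial (cur ++ [ep])).2.2.1, (pvPartial (cur ++ [ep])).2.2.2) := by
        simp only [pvStepA, ← hep, ← he, pvPartial_snoc, pvStepI, Int.toNat_natCast]
        rw [if_pos hfit, pvSegIf _ hseg]
      rw [h1, h2]
      exact ih done (cur ++ [ep])
    · have h2 : pvStepB block_size (done, cur, ((pvPartial cur).1.length : Int)) ep0
          = (done ++ [cur], [ep], ((pvPartial [ep]).1.length : Int)) := by
        simp only [pvStepB, ← hep]
        rw [if_pos (by omega)]
        simp [pvPartial, pvStepI]
      have h1 : pvStepA block_size pad_token_id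
            (done.map (pvRender block_size pad_token_id),
             (pvPartial cur).1, (pvPartial cur).2.1, (pvPartial cur).2.2.1, (pvPartial cur).2.2.2) ep0
          = ((done ++ [cur]).map (pvRender block_size pad_token_id),
             (pvPartial [ep]).1, (pvPartial [ep]).2.1,
             (pvPartial [ep]).2.2.1, (pvPartial [ep]).2.2.2) := by
        simp only [pvStepA, ← hep, ← he, Int.toNat_natCast]
        rw [if_neg hfit]
        simp [pvPartial, pvStepI, pvRender, List.map_append]
      rw [h1, h2]
      exact ih (done ++ [cur]) [ep]

-- ===== VERDICT (by name: the statement is the Claim_ definition above) =====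
theorem greedy_pack_spec : Claim_equal_greedy_pack := by
  intro episodes block_size pad_token_id _ hpre
  unfold Spec_greedy_pack greedy_pack greedy_pack_alt
  have h := pvLoop block_size pad_token_id hpre episodes [] []
  simpa [pvPartial, pvFinA, pvFinB] using h
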